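-- pv_equiv track=rewrite | github.com/jeironpro/coding-bat | coding-bat-python/lista2.py | suma67
-- ===== SOURCE A (Python) =====
-- def suma67(nums):
--     total = 0
--     tmp = False
--
--     for num in nums:
--         if num == 6:
--             tmp = True
--         elif tmp:
--             if num == 7:
--                 tmp = False
--         else:
--             total += num
--     return total
-- ===== SOURCE B (Python) =====
-- def suma67(nums):
--     it = iter(nums)
--     total = 0
--     for num in it:
--         if num == 6:
--             for inner in it:
--                 if inner == 7:
--                     break
--         else:
--             total += num
--     return total
-- ===== Notes on version B (the rewrite author's own statement) =====
-- stated objective: alternative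
-- what changed: Replaces the boolean skip-flag state machine with a shared-iterator nested loop: on a 6 an inner loop consumes elements up to the closing 7, so no flag is carried through the traversal.
import Mathlib
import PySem

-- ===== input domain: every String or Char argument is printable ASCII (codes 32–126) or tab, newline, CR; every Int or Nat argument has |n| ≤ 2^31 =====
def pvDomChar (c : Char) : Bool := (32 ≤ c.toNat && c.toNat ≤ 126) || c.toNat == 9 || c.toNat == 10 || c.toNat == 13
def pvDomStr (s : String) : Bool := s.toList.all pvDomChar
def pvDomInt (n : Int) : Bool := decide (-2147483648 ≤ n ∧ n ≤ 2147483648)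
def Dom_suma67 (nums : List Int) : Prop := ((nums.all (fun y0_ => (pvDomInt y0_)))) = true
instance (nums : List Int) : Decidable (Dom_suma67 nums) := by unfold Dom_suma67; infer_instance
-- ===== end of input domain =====

-- B replaces A's boolean skip-flag state machine by a nested loop over one shared
-- iterator (the inner loop consumes the 6..7 window); objective: alternative decomposition.

-- ===== PORT A =====
-- A: one fold carrying (total, tmp) with tmp the skip flag.
def suma67 (nums : List Int) : Int :=
  (nums.foldl
    (fun (s : Int × Bool) num =>
      if num == 6 then (s.1, true)
      else if s.2 then (if num == 7 then (s.1, false) else s)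
      else (s.1 + num, s.2))
    (0, false)).1

-- ===== PORT B =====
-- inner `for inner in it: if inner == 7: break`: returns the iterator's remainder
def suma67Inner : List Int → List Int
  | [] => []
  | x :: xs => if x == 7 then xs else suma67Inner xs

theorem suma67Inner_len_le : ∀ (l : List Int), (suma67Inner l).length ≤ l.length := by
  intro l
  induction l with
  | nil => simp [suma67Inner]
  | cons x xs ih =>
    simp only [suma67Inner]
    split
    · simp
    · exact Nat.le_succ_of_le ih

-- outer `for num in it` with accumulator `total`
def suma67Go (l : List Int) (total : Int) : Int :=
  match l with
  | [] => total
  | n :: rest =>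
    if n == 6 then suma67Go (suma67Inner rest) total
    else suma67Go rest (total + n)
termination_by l.length
decreasing_by
  · exact Nat.lt_succ_of_le (suma67Inner_len_le rest)
  · simp

def suma67_alt (nums : List Int) : Int := suma67Go nums 0

-- ===== PRECONDITION & SPEC =====
def Spec_suma67 (nums : List Int) (out : Int) : Prop := out = suma67_alt nums
instance (nums : List Int) (out : Int) : Decidable (Spec_suma67 nums out) := by unfold Spec_suma67; infer_instance

-- ===== CLAIM (what is proved, stated in full; the proofs are below) =====
def Claim_equal_suma67 : Prop := ∀ (nums : List Int), Dom_suma67 nums → Spec_suma67 nums (suma67 nums)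

-- ===== LEMMAS AND PROOFS =====
def suma67Step (s : Int × Bool) (num : Int) : Int × Bool :=
  if num == 6 then (s.1, true)
  else if s.2 then (if num == 7 then (s.1, false) else s)
  else (s.1 + num, s.2)

-- skip mode in A = fold over the remainder after the inner loop in B
theorem foldl_true_skip : ∀ (l : List Int) (t : Int),
    (l.foldl suma67Step (t, true)).1 = ((suma67Inner l).foldl suma67Step (t, false)).1 := by
  intro l
  induction l with
  | nil => intro t; simp [suma67Inner]
  | cons x xs ih =>
    intro t
    by_cases h7 : x = 7
    · subst h7; simp [suma67Inner, suma67Step]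
    · by_cases h6 : x = 6
      · subst h6; simp [suma67Inner, suma67Step, ih]
      · simp [suma67Inner, suma67Step, h6, h7, ih]

theorem go_eq_foldl : ∀ (l : List Int) (t : Int),
    suma67Go l t = (l.foldl suma67Step (t, false)).1 := by
  intro l t
  fun_induction suma67Go l t with
  | case1 => simp
  | case2 t n rest h6 ih =>
    simp only [beq_iff_eq] at h6
    subst h6
    rw [ih, ← foldl_true_skip]
    simp [suma67Step]
  | case3 t n rest h6 ih =>
    rw [ih]
    simp only [List.foldl_cons, suma67Step, h6]
    simp

-- ===== VERDICT (by name: the statement is the Claim_ definition above) =====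
theorem suma67_spec : Claim_equal_suma67 := by
  intro nums _
  show suma67 nums = suma67_alt nums
  rw [suma67_alt, go_eq_foldl, suma67]
  rfl
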